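-- pv_equiv track=rewrite | github.com/GundalaNikhil/DSA | dsa-problems/Heaps/testcases/tc_generators/generate_hep002.py | solve
-- ===== SOURCE A (Python) =====
-- import heapq
--
-- def solve(k, r, streams):
--     # streams is list of lists
--     # k is len(streams)
--     # output: list of ints
--
--     # heap: (val, stream_idx)
--     min_heap = []
--     stream_idxs = [0] * k
--     round_counts = [0] * k
--     blocked_streams = [] # list of stream indices that are blocked for this round and have elements remaining
--
--     # Initial population
--     for i in range(k):
--         if stream_idxs[i] < len(streams[i]):
--             heapq.heappush(min_heap, (streams[i][stream_idxs[i]], i))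
--
--     result = []
--
--     while min_heap or blocked_streams:
--         if not min_heap:
--             # End of round, unblock
--             # All streams in blocked_streams should now be added to heap
--             # And their round counts reset
--             for s_idx in blocked_streams:
--                 round_counts[s_idx] = 0
--                 if stream_idxs[s_idx] < len(streams[s_idx]):
--                      heapq.heappush(min_heap, (streams[s_idx][stream_idxs[s_idx]], s_idx))
--             blocked_streams = []
--
--         if not min_heap:
--             break
--
--         val, s_idx = heapq.heappop(min_heap)
--         result.append(val)
--
--         round_counts[s_idx] += 1
--         stream_idxs[s_idx] += 1
--
--         if stream_idxs[s_idx] < len(streams[s_idx]):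
--             if round_counts[s_idx] < r:
--                 heapq.heappush(min_heap, (streams[s_idx][stream_idxs[s_idx]], s_idx))
--             else:
--                 blocked_streams.append(s_idx)
--
--     return result
-- ===== SOURCE B (Python) =====
-- def solve(k, r, streams):
--     # Round-based merge without a heap: each round, every stream with elements
--     # left becomes active; repeatedly take the smallest head (value, index)
--     # among active streams, deactivating a stream once it is exhausted or has
--     # supplied r elements this round.
--     ptr = [0] * k
--     out = []
--     while any(ptr[i] < len(streams[i]) for i in range(k)):
--         active = [ptr[i] < len(streams[i]) for i in range(k)]
--         taken = [0] * k
--         while True: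
--             best = -1
--             for i in range(k):
--                 if active[i] and (best < 0 or (streams[i][ptr[i]], i) < (streams[best][ptr[best]], best)):
--                     best = i
--             if best < 0:
--                 break
--             out.append(streams[best][ptr[best]])
--             ptr[best] += 1
--             taken[best] += 1
--             if ptr[best] >= len(streams[best]) or taken[best] >= r:
--                 active[best] = False
--     return out
-- ===== Notes on version B (the rewrite author's own statement) =====
-- stated objective: simpler
-- what changed: Replaced the heapq min-heap plus blocked-streams bookkeeping with explicit rounds: each round every stream with elements left is active, the smallest (head, index) among active streams is taken by a linear scan, and a stream is deactivated once exhausted or after r picks in the round.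
import Mathlib
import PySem

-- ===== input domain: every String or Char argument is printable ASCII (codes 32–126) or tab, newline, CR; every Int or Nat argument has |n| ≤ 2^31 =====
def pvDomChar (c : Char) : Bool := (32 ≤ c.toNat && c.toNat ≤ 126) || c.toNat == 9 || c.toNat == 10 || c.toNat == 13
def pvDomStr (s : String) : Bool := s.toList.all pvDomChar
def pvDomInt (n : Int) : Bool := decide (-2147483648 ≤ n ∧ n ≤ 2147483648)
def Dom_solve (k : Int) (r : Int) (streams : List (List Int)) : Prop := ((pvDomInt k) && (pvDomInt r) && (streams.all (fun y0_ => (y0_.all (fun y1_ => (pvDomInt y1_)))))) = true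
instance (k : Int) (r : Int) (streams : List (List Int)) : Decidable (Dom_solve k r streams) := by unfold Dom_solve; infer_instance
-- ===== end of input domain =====

-- B replaces A's heapq min-heap + blocked-streams bookkeeping by explicit rounds with an
-- active-stream set and a linear min-scan per pick (objective: simpler; not faster).

-- shared accessors mirroring `len(streams[i])` and `streams[i][p]` (exact: used only with 0 ≤ i < len(streams), 0 ≤ p < len(streams[i]))
def pvLen (streams : List (List Int)) (i : Nat) : Int := ((streams.getD i []).length : Int)
def pvHeadAt (streams : List (List Int)) (i : Nat) (p : Int) : Int := (streams.getD i []).getD p.toNat 0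
-- Python tuple comparison (v1, i1) < (v2, i2)
def pvLexLt (p q : Int × Int) : Bool := p.1 < q.1 || (p.1 == q.1 && p.2 < q.2)
-- fuel bound for the loops (totality guard only; always sufficient, see proofs)
def pvTotal (streams : List (List Int)) : Nat := (streams.map List.length).sum

-- ===== PORT A =====
-- heapq model: the heap is an unordered list of (val, stream_idx); heappush = cons and
-- heappop returns the lexicographically least pair (exact: heapq pops the least tuple).
def heapPop (h : List (Int × Int)) : (Int × Int) × List (Int × Int) :=
  match h with
  | [] => ((0, 0), [])   -- unreachable: every call is guarded by an emptiness check
  | x :: xs =>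
    let m := xs.foldl (fun b p => if pvLexLt p b then p else b) x
    (m, (x :: xs).erase m)

-- the `while min_heap or blocked_streams` loop; int arrays stream_idxs/round_counts are
-- modelled as functions Nat → Int (exact: only indices 0 ≤ i < k are ever read or written)
def aloop (streams : List (List Int)) (r : Int) :
    Nat → List (Int × Int) → (Nat → Int) → (Nat → Int) → List Int → List Int → List Int
  | 0, _, _, _, _, res => res
  | fuel + 1, heap, idxs, rcs, blocked, res =>
    if heap.isEmpty && blocked.isEmpty then res
    else
      -- `if not min_heap:` unblock: for s in blocked: round_counts[s] = 0; push head if any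
      let st :=
        if heap.isEmpty then
          (blocked.foldl
            (fun (p : List (Int × Int) × (Nat → Int)) s =>
              (if idxs s.toNat < pvLen streams s.toNat then
                  (pvHeadAt streams s.toNat (idxs s.toNat), s) :: p.1
                else p.1,
               Function.update p.2 s.toNat 0))
            (heap, rcs), ([] : List Int))
        else ((heap, rcs), blocked)
      let heap1 := st.1.1
      let rcs1 := st.1.2
      let blocked1 := st.2
      if heap1.isEmpty then res   -- `break`
      else
        let pr := heapPop heap1
        let v := pr.1.1
        let si := pr.1.2
        let rest := pr.2
        let i := si.toNat
        let rcs2 := Function.update rcs1 i (rcs1 i + 1)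
        let idxs2 := Function.update idxs i (idxs i + 1)
        if idxs2 i < pvLen streams i then
          if rcs2 i < r then
            aloop streams r fuel ((pvHeadAt streams i (idxs2 i), si) :: rest) idxs2 rcs2 blocked1 (res ++ [v])
          else
            aloop streams r fuel rest idxs2 rcs2 (blocked1 ++ [si]) (res ++ [v])
        else
          aloop streams r fuel rest idxs2 rcs2 blocked1 (res ++ [v])

def solve (k : Int) (r : Int) (streams : List (List Int)) : List Int :=
  let idxs0 : Nat → Int := fun _ => 0
  -- initial population: for i in range(k): if stream_idxs[i] < len(streams[i]): push
  let heap0 := (List.range k.toNat).foldl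
    (fun hp i => if idxs0 i < pvLen streams i then (pvHeadAt streams i (idxs0 i), (i : Int)) :: hp else hp) []
  aloop streams r (2 * pvTotal streams + 2) heap0 idxs0 (fun _ => 0) [] []

-- ===== PORT B =====
-- the `for i in range(k)` scan for the smallest (head, index) among active streams;
-- returns the chosen index (Python's `best`, with none for best == -1)
def scanIdx (streams : List (List Int)) (ptr : Nat → Int) (active : Nat → Bool)
    (l : List Nat) (acc : Option Nat) : Option Nat :=
  l.foldl (fun best i =>
    if active i then
      match best with
      | none => some i
      | some b =>
        if pvLexLt (pvHeadAt streams i (ptr i), (i : Int)) (pvHeadAt streams b (ptr b), (b : Int))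
        then some i else some b
    else best) acc

-- the inner `while True` loop of Source B: pick smallest active head, deactivate on
-- exhaustion or after r picks this round; returns (out, ptr) for the outer loop
def bInner (streams : List (List Int)) (r : Int) (n : Nat) :
    Nat → (Nat → Int) → (Nat → Bool) → (Nat → Int) → List Int → List Int × (Nat → Int)
  | 0, ptr, _, _, res => (res, ptr)
  | fuel + 1, ptr, active, taken, res =>
    match scanIdx streams ptr active (List.range n) none with
    | none => (res, ptr)
    | some i =>
      let v := pvHeadAt streams i (ptr i)
      let ptr' := Function.update ptr i (ptr i + 1)
      let taken' := Function.update taken i (taken i + 1)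
      let active' := if pvLen streams i ≤ ptr' i ∨ r ≤ taken' i then Function.update active i false else active
      bInner streams r n fuel ptr' active' taken' (res ++ [v])

-- the outer `while any(...)` loop: each iteration starts a round with every
-- remaining stream active and no picks counted yet
def bOuter (streams : List (List Int)) (r : Int) (n : Nat) (F : Nat) :
    Nat → (Nat → Int) → List Int → List Int
  | 0, _, res => res
  | fuel + 1, ptr, res =>
    if (List.range n).any (fun i => decide (ptr i < pvLen streams i)) then
      let p := bInner streams r n F ptr (fun i => decide (ptr i < pvLen streams i)) (fun _ => 0) res
      bOuter streams r n F fuel p.2 p.1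
    else res

def solve_alt (k : Int) (r : Int) (streams : List (List Int)) : List Int :=
  bOuter streams r k.toNat (pvTotal streams + 1) (pvTotal streams + 1) (fun _ => 0) []

-- ===== PRECONDITION & SPEC =====
-- Pre_ excludes k > len(streams), on which A (and B) raise IndexError; nothing else.
def Pre_solve (k : Int) (r : Int) (streams : List (List Int)) : Prop := k ≤ (streams.length : Int)
instance (k : Int) (r : Int) (streams : List (List Int)) : Decidable (Pre_solve k r streams) := by unfold Pre_solve; infer_instance
def pvWitness_solve : Int × Int × List (List Int) := (2, 1, [[1, 3], [2]])
def Spec_solve (k : Int) (r : Int) (streams : List (List Int)) (out : List Int) : Prop := out = solve_alt k r streams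
instance (k : Int) (r : Int) (streams : List (List Int)) (out : List Int) : Decidable (Spec_solve k r streams out) := by unfold Spec_solve; infer_instance

-- ===== CLAIM (what is proved, stated in full; the proofs are below) =====
def Claim_equal_solve : Prop := ∀ (k : Int) (r : Int) (streams : List (List Int)), Dom_solve k r streams → Pre_solve k r streams → Spec_solve k r streams (solve k r streams)

-- ===== LEMMAS AND PROOFS =====

lemma pvLexLt_false_iff (p q : Int × Int) :
    pvLexLt p q = false ↔ ¬ (p.1 < q.1 ∨ (p.1 = q.1 ∧ p.2 < q.2)) := by
  simp [pvLexLt]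

lemma pvLexLt_iff (p q : Int × Int) : pvLexLt p q = true ↔ (p.1 < q.1 ∨ (p.1 = q.1 ∧ p.2 < q.2)) := by
  simp [pvLexLt]

lemma pvLex_antisymm (p q : Int × Int) (h1 : pvLexLt p q = false) (h2 : pvLexLt q p = false) : p = q := by
  rw [pvLexLt_false_iff] at h1 h2
  have : p.1 = q.1 ∧ p.2 = q.2 := by constructor <;> omega
  exact Prod.ext this.1 this.2

lemma pvFoldMin_spec (l : List (Int × Int)) (x : Int × Int) :
    (l.foldl (fun b p => if pvLexLt p b then p else b) x ∈ x :: l) ∧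
    (∀ p ∈ x :: l, pvLexLt p (l.foldl (fun b p => if pvLexLt p b then p else b) x) = false) := by
  induction l generalizing x with
  | nil =>
    constructor
    · simp
    · intro p hp; simp at hp; subst hp; simp only [List.foldl_nil]; rw [pvLexLt_false_iff]; omega
  | cons a t ih =>
    simp only [List.foldl_cons]
    by_cases h : pvLexLt a x = true
    · rw [if_pos h]
      obtain ⟨m1, m2⟩ := ih a
      refine ⟨List.mem_cons_of_mem x m1, ?_⟩
      intro p hp
      rcases List.mem_cons.1 hp with rfl | hp
      · have hm := m2 a List.mem_cons_self
        rw [pvLexLt_false_iff] at hm ⊢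
        rw [pvLexLt_iff] at h
        omega
      · exact m2 p hp
    · rw [if_neg h]
      obtain ⟨m1, m2⟩ := ih x
      refine ⟨?_, ?_⟩
      · rcases List.mem_cons.1 m1 with h1 | h1
        · rw [h1]; exact List.mem_cons_self
        · exact List.mem_cons_of_mem x (List.mem_cons_of_mem a h1)
      · intro p hp
        rcases List.mem_cons.1 hp with rfl | hp
        · exact m2 p List.mem_cons_self
        · rcases List.mem_cons.1 hp with rfl | hp
          · have hmx := m2 x List.mem_cons_self
            have h' : pvLexLt p x = false := Bool.eq_false_iff.2 h
            rw [pvLexLt_false_iff] at hmx h' ⊢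
            omega
          · exact m2 p (List.mem_cons_of_mem x hp)

lemma pvHeapPop_spec (h : List (Int × Int)) (hne : h ≠ []) :
    (heapPop h).1 ∈ h ∧ (∀ p ∈ h, pvLexLt p (heapPop h).1 = false) ∧ (heapPop h).2 = h.erase (heapPop h).1 := by
  match h with
  | [] => exact absurd rfl hne
  | x :: xs =>
    obtain ⟨m1, m2⟩ := pvFoldMin_spec xs x
    exact ⟨m1, m2, rfl⟩

lemma pvInitFold_count (streams : List (List Int)) (idxs0 : Nat → Int) :
    ∀ (l : List Nat) (hp : List (Int × Int)) (q : Int × Int),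
    (l.foldl (fun hp i => if idxs0 i < pvLen streams i then (pvHeadAt streams i (idxs0 i), (i : Int)) :: hp else hp) hp).count q
      = hp.count q + l.countP (fun i => decide (idxs0 i < pvLen streams i) && ((pvHeadAt streams i (idxs0 i), (i : Int)) == q)) := by
  intro l
  induction l with
  | nil => simp
  | cons a t ih =>
    intro hp q
    simp only [List.foldl_cons, List.countP_cons]
    rw [ih]
    by_cases hg : idxs0 a < pvLen streams a
    · rw [if_pos hg]
      rw [List.count_cons]
      simp only [hg, decide_true, Bool.true_and]
      by_cases he : (pvHeadAt streams a (idxs0 a), (a : Int)) = q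
      · subst he; simp; try omega
      · have h2 : ((pvHeadAt streams a (idxs0 a), (a : Int)) == q) = false := by
          simp only [beq_eq_false_iff_ne, Ne]; exact he
        simp [h2]
    · rw [if_neg hg]
      simp [hg]

def pvUnblock (streams : List (List Int)) (idxs : Nat → Int) (l : List Int)
    (st : List (Int × Int) × (Nat → Int)) : List (Int × Int) × (Nat → Int) :=
  l.foldl (fun (p : List (Int × Int) × (Nat → Int)) s =>
      (if idxs s.toNat < pvLen streams s.toNat then (pvHeadAt streams s.toNat (idxs s.toNat), s) :: p.1 else p.1,
       Function.update p.2 s.toNat 0)) st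

lemma pvUnblockFold_count (streams : List (List Int)) (idxs : Nat → Int) :
    ∀ (l : List Int) (hp : List (Int × Int)) (rc : Nat → Int) (q : Int × Int),
    (pvUnblock streams idxs l (hp, rc)).1.count q
      = hp.count q + l.countP (fun s => decide (idxs s.toNat < pvLen streams s.toNat) && ((pvHeadAt streams s.toNat (idxs s.toNat), s) == q)) := by
  intro l
  induction l with
  | nil => simp [pvUnblock]
  | cons a t ih =>
    intro hp rc q
    simp only [pvUnblock, List.foldl_cons] at ih ⊢
    rw [ih]
    simp only [List.countP_cons]
    by_cases hg : idxs a.toNat < pvLen streams a.toNat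
    · rw [if_pos hg, List.count_cons]
      simp only [hg, decide_true, Bool.true_and]
      by_cases he : (pvHeadAt streams a.toNat (idxs a.toNat), a) = q
      · subst he; simp; try omega
      · have h2 : ((pvHeadAt streams a.toNat (idxs a.toNat), a) == q) = false := by
          simp only [beq_eq_false_iff_ne, Ne]; exact he
        simp [h2]
    · rw [if_neg hg]
      simp [hg]

lemma pvUnblockFold_rc (streams : List (List Int)) (idxs : Nat → Int) :
    ∀ (l : List Int) (hp : List (Int × Int)) (rc : Nat → Int) (i : Nat),
    (pvUnblock streams idxs l (hp, rc)).2 i = if ∃ s ∈ l, s.toNat = i then 0 else rc i := by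
  intro l
  induction l with
  | nil => simp [pvUnblock]
  | cons a t ih =>
    intro hp rc i
    simp only [pvUnblock, List.foldl_cons] at ih ⊢
    rw [ih]
    by_cases hm : ∃ s ∈ t, s.toNat = i
    · rw [if_pos hm, if_pos]
      obtain ⟨s, hs, hsi⟩ := hm
      exact ⟨s, List.mem_cons_of_mem a hs, hsi⟩
    · rw [if_neg hm]
      by_cases ha : a.toNat = i
      · rw [if_pos ⟨a, List.mem_cons_self, ha⟩, Function.update_apply, if_pos ha.symm]
      · rw [if_neg, Function.update_apply, if_neg (fun hc => ha hc.symm)]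
        intro hc
        obtain ⟨s, hs, hsi⟩ := hc
        rcases List.mem_cons.1 hs with rfl | hs
        · exact ha hsi
        · exact hm ⟨s, hs, hsi⟩

lemma pvCountP_unique {α : Type} [DecidableEq α] (pred : α → Bool) (a0 : α)
    (h : ∀ a, pred a = true → a = a0) : ∀ (l : List α), l.countP pred = if pred a0 then l.count a0 else 0 := by
  intro l
  induction l with
  | nil => simp
  | cons a t ih =>
    rw [List.countP_cons, ih, List.count_cons]
    by_cases hp : pred a = true
    · have := h a hp
      subst this
      simp [hp]
    · have hpf : pred a = false := by simpa using hp
      by_cases h0 : pred a0 = true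
      · have hne : (a == a0) = false := by
          simp only [beq_eq_false_iff_ne, Ne]
          intro hc; subst hc; exact absurd h0 (by simp [hpf])
        simp [hpf, h0, hne]
      · simp [hpf, h0]

def pvRem (streams : List (List Int)) (n : Nat) (ptr : Nat → Int) : Nat :=
  ∑ i ∈ Finset.range n, (pvLen streams i - ptr i).toNat

lemma pvRem_update (streams : List (List Int)) (n : Nat) (ptr : Nat → Int) (i : Nat)
    (hi : i < n) (hlt : ptr i < pvLen streams i) :
    pvRem streams n (Function.update ptr i (ptr i + 1)) + 1 = pvRem streams n ptr := by
  unfold pvRem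
  have hmem : i ∈ Finset.range n := Finset.mem_range.2 hi
  rw [← Finset.add_sum_erase _ _ hmem, ← Finset.add_sum_erase _ (fun j => (pvLen streams j - ptr j).toNat) hmem]
  have h1 : ∀ j ∈ (Finset.range n).erase i,
      (pvLen streams j - (Function.update ptr i (ptr i + 1)) j).toNat = (pvLen streams j - ptr j).toNat := by
    intro j hj
    rw [Function.update_apply, if_neg (Finset.mem_erase.1 hj).1]
  rw [Finset.sum_congr rfl h1]
  rw [Function.update_self]
  omega

lemma pvRem_pos (streams : List (List Int)) (n : Nat) (ptr : Nat → Int) (i : Nat)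
    (hi : i < n) (hlt : ptr i < pvLen streams i) : 1 ≤ pvRem streams n ptr := by
  unfold pvRem
  have hmem : i ∈ Finset.range n := Finset.mem_range.2 hi
  calc 1 ≤ (pvLen streams i - ptr i).toNat := by omega
  _ ≤ _ := Finset.single_le_sum (f := fun j => (pvLen streams j - ptr j).toNat) (fun j _ => Nat.zero_le _) hmem

abbrev pvAvail (streams : List (List Int)) (limit : Int) (ptr rc : Nat → Int) (i : Nat) : Prop :=
  ptr i < pvLen streams i ∧ rc i < limit

def pvKey (streams : List (List Int)) (ptr : Nat → Int) (i : Nat) : Int × Int :=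
  (pvHeadAt streams i (ptr i), (i : Int))

lemma pvScanIdx_spec (streams : List (List Int)) (ptr : Nat → Int) (active : Nat → Bool) :
    ∀ (l : List Nat) (acc : Option Nat),
    ((scanIdx streams ptr active l acc = none) ↔ (acc = none ∧ ∀ i ∈ l, active i = false)) ∧
    (∀ j, scanIdx streams ptr active l acc = some j →
      (acc = some j ∨ (j ∈ l ∧ active j = true)) ∧
      (∀ b, acc = some b → pvLexLt (pvKey streams ptr b) (pvKey streams ptr j) = false) ∧
      (∀ i ∈ l, active i = true → pvLexLt (pvKey streams ptr i) (pvKey streams ptr j) = false)) := by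
  intro l
  induction l with
  | nil =>
    intro acc
    refine ⟨by simp [scanIdx], ?_⟩
    intro j hj
    simp only [scanIdx, List.foldl_nil] at hj
    subst hj
    refine ⟨Or.inl rfl, ?_, by simp⟩
    intro b hb
    cases hb
    rw [pvLexLt_false_iff]; omega
  | cons a t ih =>
    intro acc
    by_cases hav : active a = true
    · cases acc with
      | none =>
        have hstep : scanIdx streams ptr active (a :: t) none
            = scanIdx streams ptr active t (some a) := by
          simp only [scanIdx, List.foldl_cons, if_pos hav]
        rw [hstep]
        obtain ⟨ihn, ihs⟩ := ih (some a)
        constructor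
        · rw [ihn]
          constructor
          · rintro ⟨h1, -⟩; cases h1
          · rintro ⟨-, h2⟩; exact absurd hav (by simp [h2 a List.mem_cons_self])
        · intro j hj
          obtain ⟨w1, w2, w3⟩ := ihs j hj
          refine ⟨?_, ?_, ?_⟩
          · rcases w1 with w1 | ⟨hjt, hja⟩
            · obtain rfl : a = j := Option.some.inj w1
              exact Or.inr ⟨List.mem_cons_self, hav⟩
            · exact Or.inr ⟨List.mem_cons_of_mem a hjt, hja⟩
          · intro b hb; cases hb
          · intro i hi hia
            rcases List.mem_cons.1 hi with rfl | hi
            · exact w2 _ rfl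
            · exact w3 i hi hia
      | some b =>
        have hstep : scanIdx streams ptr active (a :: t) (some b)
            = scanIdx streams ptr active t
                (some (if pvLexLt (pvKey streams ptr a) (pvKey streams ptr b) then a else b)) := by
          simp only [scanIdx, List.foldl_cons, if_pos hav, pvKey]
          split <;> rfl
        rw [hstep]
        obtain ⟨ihn, ihs⟩ := ih (some (if pvLexLt (pvKey streams ptr a) (pvKey streams ptr b) then a else b))
        constructor
        · rw [ihn]
          constructor
          · rintro ⟨h1, -⟩; cases h1
          · rintro ⟨h1, -⟩; cases h1
        · intro j hj
          obtain ⟨w1, w2, w3⟩ := ihs j hj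
          by_cases hlt : pvLexLt (pvKey streams ptr a) (pvKey streams ptr b) = true
          · rw [if_pos hlt] at w1 w2
            have hca : pvLexLt (pvKey streams ptr a) (pvKey streams ptr j) = false := w2 _ rfl
            refine ⟨?_, ?_, ?_⟩
            · rcases w1 with w1 | ⟨hjt, hja⟩
              · exact Or.inr ⟨by rw [← Option.some.inj w1]; exact List.mem_cons_self,
                  by rw [← Option.some.inj w1]; exact hav⟩
              · exact Or.inr ⟨List.mem_cons_of_mem a hjt, hja⟩
            · intro q hq
              cases hq
              rw [pvLexLt_false_iff] at hca ⊢
              rw [pvLexLt_iff] at hlt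
              omega
            · intro i hi hia
              rcases List.mem_cons.1 hi with rfl | hi
              · exact hca
              · exact w3 i hi hia
          · rw [if_neg hlt] at w1 w2
            have hbm : pvLexLt (pvKey streams ptr b) (pvKey streams ptr j) = false := w2 _ rfl
            have hlt' : pvLexLt (pvKey streams ptr a) (pvKey streams ptr b) = false := Bool.eq_false_iff.2 hlt
            refine ⟨?_, ?_, ?_⟩
            · rcases w1 with w1 | ⟨hjt, hja⟩
              · exact Or.inl w1
              · exact Or.inr ⟨List.mem_cons_of_mem a hjt, hja⟩
            · intro q hq
              cases hq
              exact hbm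
            · intro i hi hia
              rcases List.mem_cons.1 hi with rfl | hi
              · rw [pvLexLt_false_iff] at hbm hlt' ⊢
                omega
              · exact w3 i hi hia
    · have hstep : scanIdx streams ptr active (a :: t) acc = scanIdx streams ptr active t acc := by
        simp only [scanIdx, List.foldl_cons, if_neg hav]
      rw [hstep]
      obtain ⟨ihn, ihs⟩ := ih acc
      constructor
      · rw [ihn]
        constructor
        · rintro ⟨h1, h2⟩
          refine ⟨h1, fun i hi => ?_⟩
          rcases List.mem_cons.1 hi with rfl | hi
          · exact Bool.eq_false_iff.2 hav
          · exact h2 i hi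
        · rintro ⟨h1, h2⟩
          exact ⟨h1, fun i hi => h2 i (List.mem_cons_of_mem a hi)⟩
      · intro j hj
        obtain ⟨w1, w2, w3⟩ := ihs j hj
        refine ⟨?_, w2, ?_⟩
        · rcases w1 with w1 | ⟨hjt, hja⟩
          · exact Or.inl w1
          · exact Or.inr ⟨List.mem_cons_of_mem a hjt, hja⟩
        · intro i hi hia
          rcases List.mem_cons.1 hi with rfl | hi
          · exact absurd hia (by simp [hav])
          · exact w3 i hi hia

def pvC (streams : List (List Int)) (limit : Int) (ptr rc : Nat → Int) (n : Nat) (p : Int × Int) : Nat :=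
  if 0 ≤ p.2 ∧ p.2.toNat < n ∧ pvAvail streams limit ptr rc p.2.toNat ∧ p = pvKey streams ptr p.2.toNat then 1 else 0

-- bisimulation invariant: heap content counted canonically from (ptr, rcA); blocked =
-- exactly the live streams over quota; taken agrees with rcA on live streams; active
-- flags characterise availability
def pvInv (streams : List (List Int)) (limit : Int) (n : Nat)
    (heap : List (Int × Int)) (ptr rcA taken : Nat → Int) (active : Nat → Bool) (blocked : List Int) : Prop :=
  (∀ p, heap.count p = pvC streams limit ptr rcA n p) ∧
  (∀ j : Int, blocked.count j =
      if 0 ≤ j ∧ j.toNat < n ∧ ptr j.toNat < pvLen streams j.toNat ∧ ¬ rcA j.toNat < limit then 1 else 0) ∧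
  (∀ i, i < n → ptr i < pvLen streams i → rcA i = taken i) ∧
  (∀ i, i < n → (active i = true ↔ (ptr i < pvLen streams i ∧ taken i < limit))) ∧
  (∀ i, 0 ≤ rcA i) ∧ (∀ i, 0 ≤ taken i) ∧
  (∀ i, 0 ≤ ptr i ∧ ptr i ≤ pvLen streams i)

-- "finish the current inner round, then run the remaining outer rounds"
def pvRun (streams : List (List Int)) (r : Int) (n F fo fi : Nat)
    (ptr : Nat → Int) (active : Nat → Bool) (taken : Nat → Int) (res : List Int) : List Int :=
  bOuter streams r n F fo (bInner streams r n fi ptr active taken res).2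
    (bInner streams r n fi ptr active taken res).1

lemma pvKey_mem_heap (streams : List (List Int)) (limit : Int) (n : Nat)
    (heap : List (Int × Int)) (ptr rcA : Nat → Int)
    (hcnt : ∀ p, heap.count p = pvC streams limit ptr rcA n p)
    (j : Nat) (hj : j < n) (hav : pvAvail streams limit ptr rcA j) :
    pvKey streams ptr j ∈ heap := by
  rw [← List.count_pos_iff, hcnt, pvC]
  rw [if_pos ⟨by simp [pvKey], by simp [pvKey, hj], by simpa [pvKey] using hav, by simp [pvKey]⟩]
  omega

lemma pvHeap_mem_elim (streams : List (List Int)) (limit : Int) (n : Nat)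
    (heap : List (Int × Int)) (ptr rcA : Nat → Int)
    (hcnt : ∀ p, heap.count p = pvC streams limit ptr rcA n p)
    (p : Int × Int) (hp : p ∈ heap) :
    0 ≤ p.2 ∧ p.2.toNat < n ∧ pvAvail streams limit ptr rcA p.2.toNat ∧ p = pvKey streams ptr p.2.toNat := by
  rw [← List.count_pos_iff, hcnt, pvC] at hp
  by_contra hc
  rw [if_neg hc] at hp
  omega

lemma pvLt_max_iff (x r : Int) (hx : 0 ≤ x) : x + 1 < max r 1 ↔ x + 1 < r := by
  rcases max_cases r 1 with ⟨h1, h2⟩ | ⟨h1, h2⟩ <;> rw [h1] <;> omega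

lemma pvBOuter_done (streams : List (List Int)) (r : Int) (n F : Nat) (f : Nat)
    (ptr : Nat → Int) (res : List Int)
    (h : ((List.range n).any fun i => decide (ptr i < pvLen streams i)) = false) :
    bOuter streams r n F f ptr res = res := by
  cases f with
  | zero => rfl
  | succ f' => simp [bOuter, h]

lemma pvBInner_done (streams : List (List Int)) (r : Int) (n : Nat)
    (ptr : Nat → Int) (active : Nat → Bool) (taken : Nat → Int) (res : List Int)
    (h : scanIdx streams ptr active (List.range n) none = none) :
    ∀ f, bInner streams r n f ptr active taken res = (res, ptr) := by
  intro f
  cases f with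
  | zero => rfl
  | succ f' => simp [bInner, h]

lemma pvPopStep (streams : List (List Int)) (r : Int) (n F : Nat) (fa fi fo : Nat)
    (IH : ∀ (fi' fo' : Nat) (heap' : List (Int × Int)) (ptr' rcA' taken' : Nat → Int)
      (active' : Nat → Bool) (blocked' : List Int) (res' : List Int),
      pvInv streams (max r 1) n heap' ptr' rcA' taken' active' blocked' →
      2 * pvRem streams n ptr' + 2 ≤ fa → pvRem streams n ptr' + 1 ≤ fi' → pvRem streams n ptr' ≤ fo' →
      aloop streams r fa heap' ptr' rcA' blocked' res' = pvRun streams r n F fo' fi' ptr' active' taken' res')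
    (heap : List (Int × Int)) (ptr rcA taken : Nat → Int) (active : Nat → Bool)
    (blocked : List Int) (res : List Int)
    (hInv : pvInv streams (max r 1) n heap ptr rcA taken active blocked)
    (hne : heap ≠ [])
    (hfa : 2 * pvRem streams n ptr ≤ fa) (hfi : pvRem streams n ptr ≤ fi)
    (hfo : pvRem streams n ptr ≤ fo + 1) :
    aloop streams r (fa + 1) heap ptr rcA blocked res = pvRun streams r n F fo (fi + 1) ptr active taken res := by
  obtain ⟨hcnt, hblk, hagree, hact, hrcA0, htk0, hptr⟩ := hInv
  obtain ⟨hmem, hmin, hrest⟩ := pvHeapPop_spec heap hne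
  obtain ⟨hm2, hin, hav, hkey⟩ := pvHeap_mem_elim streams (max r 1) n heap ptr rcA hcnt _ hmem
  set m := (heapPop heap).1 with hmdef
  set i := m.2.toNat with hidef
  have hkey' : pvKey streams ptr i = m := hkey.symm
  -- B's scan finds exactly stream i
  have hactB : active i = true := (hact i hin).2 ⟨hav.1, by rw [← hagree i hin hav.1]; exact hav.2⟩
  obtain ⟨ihn, ihs⟩ := pvScanIdx_spec streams ptr active (List.range n) none
  have hsb : scanIdx streams ptr active (List.range n) none = some i := by
    rcases hscan : scanIdx streams ptr active (List.range n) none with _ | j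
    · exact absurd hactB (by simp [(ihn.1 hscan).2 i (List.mem_range.2 hin)])
    · obtain ⟨w1, -, w3⟩ := ihs j hscan
      have hj' : j ∈ List.range n ∧ active j = true := by
        rcases w1 with w1 | w1
        · cases w1
        · exact w1
      have hjn : j < n := List.mem_range.1 hj'.1
      obtain ⟨hjlt, hjtk⟩ := (hact j hjn).1 hj'.2
      have hjavA : pvAvail streams (max r 1) ptr rcA j := ⟨hjlt, by rw [hagree j hjn hjlt]; exact hjtk⟩
      have hjmem : pvKey streams ptr j ∈ heap := pvKey_mem_heap streams (max r 1) n heap ptr rcA hcnt j hjn hjavA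
      have h1 : pvLexLt (pvKey streams ptr j) m = false := hmin _ hjmem
      have h2 : pvLexLt m (pvKey streams ptr j) = false := by
        have := w3 i (List.mem_range.2 hin) hactB
        rwa [hkey'] at this
      have hkj : pvKey streams ptr j = m := pvLex_antisymm _ _ h1 h2
      have hj2 : ((j : Nat) : Int) = m.2 := by
        have := congrArg Prod.snd hkj
        simpa [pvKey] using this
      have : j = i := by omega
      rw [this]
  have hicast : ((i : Nat) : Int) = m.2 := by rw [hidef]; exact Int.toNat_of_nonneg hm2
  have hm1 : pvHeadAt streams i (ptr i) = m.1 := by rw [← hkey']; rfl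
  -- one B inner step
  have hBstep : pvRun streams r n F fo (fi + 1) ptr active taken res
      = pvRun streams r n F fo fi (Function.update ptr i (ptr i + 1))
          (if pvLen streams i ≤ ptr i + 1 ∨ r ≤ taken i + 1 then Function.update active i false else active)
          (Function.update taken i (taken i + 1)) (res ++ [m.1]) := by
    simp only [pvRun, bInner, hsb, Function.update_self, hm1]
  -- one A step
  have hnemp : heap.isEmpty = false := by simpa [List.isEmpty_iff] using hne
  have hpop : heapPop heap = (m, heap.erase m) := by
    rw [hmdef]; exact Prod.ext rfl (by rw [hrest])
  conv_lhs => simp [aloop, hnemp, hpop, Function.update_self]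
  rw [hBstep]
  rw [← hidef]
  have hlive : ptr i < pvLen streams i := hav.1
  have hravail : rcA i < max r 1 := hav.2
  have hrag : rcA i = taken i := hagree i hin hlive
  have hL1 : (1 : Int) ≤ max r 1 := le_max_right r 1
  have hrem := pvRem_update streams n ptr i hin hlive
  have hrpos := pvRem_pos streams n ptr i hin hlive
  set ptr2 := Function.update ptr i (ptr i + 1) with hptr2
  set taken2 := Function.update taken i (taken i + 1) with htaken2
  set active2 := if pvLen streams i ≤ ptr i + 1 ∨ r ≤ taken i + 1 then Function.update active i false else active with hactive2
  have hagree' : ∀ j, j < n → ptr2 j < pvLen streams j →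
      Function.update rcA i (rcA i + 1) j = taken2 j := by
    intro j hj hpj
    by_cases hji : j = i
    · subst hji; simp [hptr2, htaken2, hrag]
    · rw [hptr2, Function.update_apply, if_neg hji] at hpj
      rw [htaken2, Function.update_apply, Function.update_apply, if_neg hji, if_neg hji]
      exact hagree j hj hpj
  have hact' : ∀ j, j < n → (active2 j = true ↔ (ptr2 j < pvLen streams j ∧ taken2 j < max r 1)) := by
    intro j hj
    by_cases hji : j = i
    · subst hji
      have hp2 : ptr2 i = ptr i + 1 := by rw [hptr2, Function.update_self]
      have ht2 : taken2 i = taken i + 1 := by rw [htaken2, Function.update_self]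
      have hmax : taken i + 1 < max r 1 ↔ taken i + 1 < r := pvLt_max_iff (taken i) r (htk0 i)
      rw [hp2, ht2]
      by_cases hcond : pvLen streams i ≤ ptr i + 1 ∨ r ≤ taken i + 1
      · rw [hactive2, if_pos hcond, Function.update_self]
        simp only [Bool.false_eq_true, false_iff]
        rw [not_and_or]
        rcases hcond with h | h
        · exact Or.inl (by omega)
        · exact Or.inr (by rw [hmax]; omega)
      · rw [hactive2, if_neg hcond]
        rw [not_or] at hcond
        simp only [hactB, true_iff]
        exact ⟨by omega, by rw [hmax]; omega⟩
    · have hp2 : ptr2 j = ptr j := by rw [hptr2, Function.update_apply, if_neg hji]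
      have ht2 : taken2 j = taken j := by rw [htaken2, Function.update_apply, if_neg hji]
      have ha2 : active2 j = active j := by
        rw [hactive2]; split
        · rw [Function.update_apply, if_neg hji]
        · rfl
      rw [hp2, ht2, ha2]
      exact hact j hj
  have hrcA0' : ∀ j, 0 ≤ Function.update rcA i (rcA i + 1) j := by
    intro j; rw [Function.update_apply]; split_ifs with hji
    · subst hji; have := hrcA0 i; omega
    · exact hrcA0 j
  have htk0' : ∀ j, 0 ≤ taken2 j := by
    intro j; rw [htaken2, Function.update_apply]; split_ifs with hji
    · subst hji; have := htk0 i; omega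
    · exact htk0 j
  have hptr' : ∀ j, 0 ≤ ptr2 j ∧ ptr2 j ≤ pvLen streams j := by
    intro j; rw [hptr2, Function.update_apply]; split_ifs with hji
    · subst hji; have h1 := hptr i; have := hlive; constructor <;> omega
    · exact hptr j
  -- pvC at indices other than i is untouched
  have hCsame : ∀ (rc' : Nat → Int) (p : Int × Int), (0 ≤ p.2 → p.2.toNat ≠ i) →
      (∀ j, j ≠ i → rc' j = rcA j) →
      pvC streams (max r 1) ptr2 rc' n p = pvC streams (max r 1) ptr rcA n p := by
    intro rc' p hpne hrc'
    by_cases hp0 : 0 ≤ p.2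
    · have hne' : p.2.toNat ≠ i := hpne hp0
      have hupd : ptr2 p.2.toNat = ptr p.2.toNat := by
        rw [hptr2, Function.update_apply, if_neg hne']
      have hrceq : rc' p.2.toNat = rcA p.2.toNat := hrc' _ hne'
      have hkeyeq : pvKey streams ptr2 p.2.toNat = pvKey streams ptr p.2.toNat := by
        unfold pvKey; rw [hupd]
      simp only [pvC, pvAvail, hupd, hrceq, hkeyeq]
    · unfold pvC; rw [if_neg (by tauto), if_neg (by tauto)]
  by_cases hc1 : ptr i + 1 < pvLen streams i
  · by_cases hc2 : rcA i + 1 < r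
    · rw [if_pos hc1, if_pos hc2]
      have hc2' : rcA i + 1 < max r 1 := by
        rw [pvLt_max_iff _ _ (hrcA0 i)]; exact hc2
      apply IH
      · refine ⟨?_, ?_, hagree', hact', hrcA0', htk0', hptr'⟩
        · -- heap count
          intro p
          rw [List.count_cons, List.count_erase, hcnt p]
          by_cases hpm : p = m
          · subst hpm
            have h1 : pvC streams (max r 1) ptr rcA n m = 1 := by
              unfold pvC; rw [if_pos ⟨hm2, hin, hav, hkey⟩]
            rw [h1]
            have hself : (m == m) = true := by simp
            rw [hself]
            have hCnew : pvC streams (max r 1) ptr2 (Function.update rcA i (rcA i + 1)) n m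
                = if m = (pvHeadAt streams i (ptr i + 1), m.2) then 1 else 0 := by
              unfold pvC
              rw [← hidef]
              have hup : ptr2 i = ptr i + 1 := by rw [hptr2, Function.update_self]
              have hur : Function.update rcA i (rcA i + 1) i = rcA i + 1 := Function.update_self ..
              have hkeq : pvKey streams ptr2 i = (pvHeadAt streams i (ptr i + 1), m.2) := by
                unfold pvKey; rw [hup, hicast]
              rw [hkeq]
              by_cases hpk : m = (pvHeadAt streams i (ptr i + 1), m.2)
              · rw [if_pos hpk, if_pos ⟨hm2, hin, ⟨by rw [hup]; exact hc1, by rw [hur]; exact hc2'⟩, hpk⟩]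
              · rw [if_neg (by tauto), if_neg hpk]
            rw [hCnew]
            by_cases hpk : m = (pvHeadAt streams i (ptr i + 1), m.2)
            · have hb : ((pvHeadAt streams i (ptr i + 1), m.2) == m) = true := by
                rw [beq_iff_eq]; exact hpk.symm
              rw [hb, if_pos hpk] <;> simp
            · have hb : ((pvHeadAt streams i (ptr i + 1), m.2) == m) = false := by
                rw [beq_eq_false_iff_ne]; exact fun h => hpk h.symm
              rw [hb, if_neg hpk] <;> simp
          · have hne1 : (m == p) = false := by rw [beq_eq_false_iff_ne]; exact fun h => hpm h.symm
            rw [hne1]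
            by_cases hpi : 0 ≤ p.2 ∧ p.2.toNat = i
            · obtain ⟨hp0, hpti⟩ := hpi
              have hold : pvC streams (max r 1) ptr rcA n p = 0 := by
                unfold pvC
                rw [if_neg]
                rintro ⟨-, -, -, hk⟩
                rw [hpti, hkey'] at hk
                exact hpm hk
              rw [hold]
              have hnew : pvC streams (max r 1) ptr2 (Function.update rcA i (rcA i + 1)) n p
                  = if p = (pvHeadAt streams i (ptr i + 1), m.2) then 1 else 0 := by
                unfold pvC
                rw [hpti]
                have hup : ptr2 i = ptr i + 1 := by rw [hptr2, Function.update_self]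
                have hur : Function.update rcA i (rcA i + 1) i = rcA i + 1 := Function.update_self ..
                have hkeq : pvKey streams ptr2 i = (pvHeadAt streams i (ptr i + 1), m.2) := by
                  unfold pvKey; rw [hup, hicast]
                rw [hkeq]
                by_cases hpk : p = (pvHeadAt streams i (ptr i + 1), m.2)
                · rw [if_pos hpk, if_pos ⟨hp0, hin, ⟨by rw [hup]; exact hc1, by rw [hur]; exact hc2'⟩, hpk⟩]
                · rw [if_neg (by tauto), if_neg hpk]
              rw [hnew]
              by_cases hpk : p = (pvHeadAt streams i (ptr i + 1), m.2)
              · have hb : ((pvHeadAt streams i (ptr i + 1), m.2) == p) = true := by rw [beq_iff_eq]; exact hpk.symm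
                rw [hb, if_pos hpk] <;> simp
              · have hb : ((pvHeadAt streams i (ptr i + 1), m.2) == p) = false := by
                  rw [beq_eq_false_iff_ne]; exact fun h => hpk h.symm
                rw [hb, if_neg hpk] <;> simp
            · have hpk : ((pvHeadAt streams i (ptr i + 1), m.2) == p) = false := by
                rw [beq_eq_false_iff_ne]
                intro hk
                exact hpi ⟨by rw [← hk]; exact hm2, by rw [← hk]⟩
              rw [hpk, hCsame (Function.update rcA i (rcA i + 1)) p
                    (fun h0 hti => hpi ⟨h0, hti⟩)
                    (fun j hj => by rw [Function.update_apply, if_neg hj])]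
              simp
        · -- blocked count
          intro j
          rw [hblk j]
          by_cases hji : 0 ≤ j ∧ j.toNat = i
          · obtain ⟨hj0, hjti⟩ := hji
            rw [hjti]
            have hup : ptr2 i = ptr i + 1 := by rw [hptr2, Function.update_self]
            have hur : Function.update rcA i (rcA i + 1) i = rcA i + 1 := Function.update_self ..
            rw [hup, hur, if_neg (fun hcon => hcon.2.2.2 hravail), if_neg (fun hcon => hcon.2.2.2 hc2')]
          · by_cases hj0 : 0 ≤ j
            · have hjne : j.toNat ≠ i := fun h => hji ⟨hj0, h⟩
              rw [hptr2, Function.update_apply, Function.update_apply, if_neg hjne, if_neg hjne]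
            · rw [if_neg (by tauto), if_neg (by tauto)]
      · omega
      · omega
      · omega
    · rw [if_pos hc1, if_neg hc2]
      have hnotav : ¬ (rcA i + 1 < max r 1) := by
        rw [pvLt_max_iff _ _ (hrcA0 i)]; exact hc2
      apply IH
      · refine ⟨?_, ?_, hagree', hact', hrcA0', htk0', hptr'⟩
        · intro p
          rw [List.count_erase, hcnt p]
          have hCnew0 : pvC streams (max r 1) ptr2 (Function.update rcA i (rcA i + 1)) n p
              = if (0 ≤ p.2 ∧ p.2.toNat = i) then 0 else pvC streams (max r 1) ptr rcA n p := by
            by_cases hpi : 0 ≤ p.2 ∧ p.2.toNat = i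
            · rw [if_pos hpi]
              unfold pvC
              rw [if_neg]
              rintro ⟨-, -, hav', -⟩
              rw [hpi.2] at hav'
              exact hnotav (by have h2 := hav'.2; rwa [Function.update_self] at h2)
            · rw [if_neg hpi]
              exact hCsame (Function.update rcA i (rcA i + 1)) p (fun h0 hti => hpi ⟨h0, hti⟩)
                (fun j hj => by rw [Function.update_apply, if_neg hj])
          rw [hCnew0]
          by_cases hpm : p = m
          · subst hpm
            have h1 : pvC streams (max r 1) ptr rcA n m = 1 := by
              unfold pvC; rw [if_pos ⟨hm2, hin, hav, hkey⟩]
            rw [h1, if_pos (show 0 ≤ m.2 ∧ m.2.toNat = i from ⟨hm2, hidef.symm⟩)]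
            simp
          · have hne1 : (m == p) = false := by rw [beq_eq_false_iff_ne]; exact fun h => hpm h.symm
            rw [hne1]
            by_cases hpi : 0 ≤ p.2 ∧ p.2.toNat = i
            · have hold : pvC streams (max r 1) ptr rcA n p = 0 := by
                unfold pvC
                rw [if_neg]
                rintro ⟨-, -, -, hk⟩
                rw [hpi.2, hkey'] at hk
                exact hpm hk
              rw [hold, if_pos hpi]
              simp
            · rw [if_neg hpi]
              simp
        · intro j
          rw [List.count_append, hblk j]
          by_cases hji : 0 ≤ j ∧ j.toNat = i
          · obtain ⟨hj0, hjti⟩ := hji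
            have hjm : j = m.2 := by omega
            have hone : List.count j [m.2] = 1 := by rw [hjm]; simp
            rw [hone, hjti]
            have hup : ptr2 i = ptr i + 1 := by rw [hptr2, Function.update_self]
            rw [hup, Function.update_self,
              if_neg (fun hcon => hcon.2.2.2 hravail), if_pos ⟨hj0, hin, hc1, hnotav⟩]
          · have hzero : List.count j [m.2] = 0 := by
              rw [List.count_eq_zero]
              simp only [List.mem_singleton]
              intro hjm
              exact hji ⟨by rw [hjm]; exact hm2, by rw [hjm]⟩
            rw [hzero]
            by_cases hj0 : 0 ≤ j
            · have hjne : j.toNat ≠ i := fun h => hji ⟨hj0, h⟩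
              rw [hptr2, Function.update_apply, Function.update_apply, if_neg hjne, if_neg hjne]
              omega
            · rw [if_neg (by tauto), if_neg (by tauto)]
      · omega
      · omega
      · omega
  · rw [if_neg hc1]
    apply IH
    · refine ⟨?_, ?_, hagree', hact', hrcA0', htk0', hptr'⟩
      · intro p
        rw [List.count_erase, hcnt p]
        have hCnew0 : pvC streams (max r 1) ptr2 (Function.update rcA i (rcA i + 1)) n p
            = if (0 ≤ p.2 ∧ p.2.toNat = i) then 0 else pvC streams (max r 1) ptr rcA n p := by
          by_cases hpi : 0 ≤ p.2 ∧ p.2.toNat = i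
          · rw [if_pos hpi]
            unfold pvC
            rw [if_neg]
            rintro ⟨-, -, hav', -⟩
            rw [hpi.2] at hav'
            exact hc1 (by have h2 := hav'.1; rwa [hptr2, Function.update_self] at h2)
          · rw [if_neg hpi]
            exact hCsame (Function.update rcA i (rcA i + 1)) p (fun h0 hti => hpi ⟨h0, hti⟩)
              (fun j hj => by rw [Function.update_apply, if_neg hj])
        rw [hCnew0]
        by_cases hpm : p = m
        · subst hpm
          have h1 : pvC streams (max r 1) ptr rcA n m = 1 := by
            unfold pvC; rw [if_pos ⟨hm2, hin, hav, hkey⟩]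
          rw [h1, if_pos (show 0 ≤ m.2 ∧ m.2.toNat = i from ⟨hm2, hidef.symm⟩)]
          simp
        · have hne1 : (m == p) = false := by rw [beq_eq_false_iff_ne]; exact fun h => hpm h.symm
          rw [hne1]
          by_cases hpi : 0 ≤ p.2 ∧ p.2.toNat = i
          · have hold : pvC streams (max r 1) ptr rcA n p = 0 := by
              unfold pvC
              rw [if_neg]
              rintro ⟨-, -, -, hk⟩
              rw [hpi.2, hkey'] at hk
              exact hpm hk
            rw [hold, if_pos hpi]
            simp
          · rw [if_neg hpi]
            simp
      · intro j
        rw [hblk j]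
        by_cases hji : 0 ≤ j ∧ j.toNat = i
        · obtain ⟨hj0, hjti⟩ := hji
          rw [hjti, Function.update_self]
          have hup : ptr2 i = ptr i + 1 := by rw [hptr2, Function.update_self]
          rw [hup, if_neg (fun hcon => hcon.2.2.2 hravail), if_neg (fun hcon => hc1 hcon.2.2.1)]
        · by_cases hj0 : 0 ≤ j
          · have hjne : j.toNat ≠ i := fun h => hji ⟨hj0, h⟩
            rw [hptr2, Function.update_apply, Function.update_apply, if_neg hjne, if_neg hjne]
          · rw [if_neg (by tauto), if_neg (by tauto)]
    · omega
    · omega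
    · omega

lemma pvSum_getD (L : List (List Int)) :
    (L.map List.length).sum = ∑ i ∈ Finset.range L.length, (L.getD i []).length := by
  induction L with
  | nil => simp
  | cons a t ih =>
    simp only [List.map_cons, List.sum_cons, List.length_cons]
    rw [Finset.sum_range_succ']
    simp only [List.getD_cons_succ, List.getD_cons_zero]
    rw [← ih]
    omega

lemma pvRem_init (streams : List (List Int)) (n : Nat) (hn : n ≤ streams.length) :
    pvRem streams n (fun _ => 0) ≤ pvTotal streams := by
  unfold pvRem pvTotal
  rw [pvSum_getD]
  have h1 : ∀ i, (pvLen streams i - (0 : Int)).toNat = (streams.getD i []).length := by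
    intro i; simp [pvLen]
  calc ∑ i ∈ Finset.range n, (pvLen streams i - (fun _ => (0:Int)) i).toNat
      = ∑ i ∈ Finset.range n, (streams.getD i []).length := by
        exact Finset.sum_congr rfl (fun i _ => h1 i)
    _ ≤ ∑ i ∈ Finset.range streams.length, (streams.getD i []).length :=
        Finset.sum_le_sum_of_subset (by
          intro x hx
          simp only [Finset.mem_range] at hx ⊢
          omega)

lemma pvRem_le_total (streams : List (List Int)) (n : Nat) (ptr : Nat → Int)
    (hn : n ≤ streams.length) (h0 : ∀ i, 0 ≤ ptr i) :
    pvRem streams n ptr ≤ pvTotal streams := by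
  refine le_trans ?_ (pvRem_init streams n hn)
  unfold pvRem
  apply Finset.sum_le_sum
  intro i _
  have := h0 i
  have hb : (fun _ : Nat => (0 : Int)) i = 0 := rfl
  rw [hb]
  omega

lemma pvMain (streams : List (List Int)) (r : Int) (n F : Nat)
    (hF : pvTotal streams + 1 ≤ F) (hn : n ≤ streams.length) :
    ∀ (fa : Nat) (fi fo : Nat) (heap : List (Int × Int)) (ptr rcA taken : Nat → Int)
      (active : Nat → Bool) (blocked : List Int) (res : List Int),
    pvInv streams (max r 1) n heap ptr rcA taken active blocked →
    2 * pvRem streams n ptr + 2 ≤ fa → pvRem streams n ptr + 1 ≤ fi → pvRem streams n ptr ≤ fo →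
    aloop streams r fa heap ptr rcA blocked res = pvRun streams r n F fo fi ptr active taken res := by
  intro fa
  induction fa with
  | zero => intro fi fo heap ptr rcA taken active blocked res hInv hfa hfi hfo; omega
  | succ fa ih =>
    intro fi fo heap ptr rcA taken active blocked res hInv hfa hfi hfo
    by_cases hne : heap = []
    case neg =>
      obtain ⟨fi', rfl⟩ : ∃ fi', fi = fi' + 1 := ⟨fi - 1, by omega⟩
      exact pvPopStep streams r n F fa fi' fo ih heap ptr rcA taken active blocked res hInv hne
        (by omega) (by omega) (by omega)
    case pos =>
      subst hne
      obtain ⟨hcnt, hblk, hagree, hact, hrcA0, htk0, hptr⟩ := hInv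
      have hL1 : (1 : Int) ≤ max r 1 := le_max_right r 1
      -- heap empty: no stream is available, so B's scan is empty and its round ends
      have hnoavailA : ∀ i, i < n → ¬ pvAvail streams (max r 1) ptr rcA i := by
        intro i hi hav
        have := pvKey_mem_heap streams (max r 1) n [] ptr rcA hcnt i hi hav
        simp at this
      have hinact : ∀ i ∈ List.range n, active i = false := by
        intro i hi
        by_contra hc
        have hia : active i = true := by simpa using hc
        obtain ⟨h1, h2⟩ := (hact i (List.mem_range.1 hi)).1 hia
        exact hnoavailA i (List.mem_range.1 hi)
          ⟨h1, by rw [hagree i (List.mem_range.1 hi) h1]; exact h2⟩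
      obtain ⟨ihn, -⟩ := pvScanIdx_spec streams ptr active (List.range n) none
      have hscan0 : scanIdx streams ptr active (List.range n) none = none := ihn.2 ⟨rfl, hinact⟩
      have hRunDone : pvRun streams r n F fo fi ptr active taken res
          = bOuter streams r n F fo ptr res := by
        unfold pvRun
        rw [pvBInner_done streams r n ptr active taken res hscan0 fi]
      rw [hRunDone]
      by_cases hbl : blocked = []
      · subst hbl
        have hA : aloop streams r (fa + 1) [] ptr rcA [] res = res := by simp [aloop]
        have hnorem : ∀ i, i < n → ¬ ptr i < pvLen streams i := by
          intro i hi hlt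
          by_cases hrc : rcA i < max r 1
          · exact hnoavailA i hi ⟨hlt, hrc⟩
          · have h := hblk (i : Int)
            rw [if_pos ⟨Int.natCast_nonneg i, by rw [Int.toNat_natCast]; exact hi,
                by rw [Int.toNat_natCast]; exact hlt, by rw [Int.toNat_natCast]; exact hrc⟩] at h
            simp at h
        rw [hA]
        rw [pvBOuter_done streams r n F fo ptr res]
        rw [List.any_eq_false]
        intro i hi
        simpa using hnorem i (List.mem_range.1 hi)
      · -- end of round: A unblocks and pops; B starts a new round and picks
        set ub := pvUnblock streams ptr blocked ([], rcA) with hub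
        have hbfacts : ∀ s ∈ blocked,
            0 ≤ s ∧ s.toNat < n ∧ ptr s.toNat < pvLen streams s.toNat ∧ ¬ rcA s.toNat < max r 1 := by
          intro s hs
          rw [← List.count_pos_iff, hblk s] at hs
          by_contra hc
          rw [if_neg hc] at hs
          omega
        have hmemiff : ∀ i : Nat, (∃ s ∈ blocked, s.toNat = i) ↔
            (i < n ∧ ptr i < pvLen streams i ∧ ¬ rcA i < max r 1) := by
          intro i
          constructor
          · rintro ⟨s, hs, rfl⟩
            exact (hbfacts s hs).2
          · rintro ⟨hi, hlt, hrc⟩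
            have h := hblk (i : Int)
            rw [if_pos ⟨Int.natCast_nonneg i, by rw [Int.toNat_natCast]; exact hi,
                by rw [Int.toNat_natCast]; exact hlt, by rw [Int.toNat_natCast]; exact hrc⟩] at h
            have : (i : Int) ∈ blocked := by rw [← List.count_pos_iff]; omega
            exact ⟨(i : Int), this, Int.toNat_natCast i⟩
        have hrc1 : ∀ i, ub.2 i = if (∃ s ∈ blocked, s.toNat = i) then 0 else rcA i := by
          intro i; rw [hub]; exact pvUnblockFold_rc streams ptr blocked [] rcA i
        have hrc1live : ∀ i, i < n → ptr i < pvLen streams i → ub.2 i = 0 := by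
          intro i hi hlt
          rw [hrc1 i, if_pos ((hmemiff i).2 ⟨hi, hlt, by
            intro hrc; exact hnoavailA i hi ⟨hlt, hrc⟩⟩)]
        have hrc1A0 : ∀ i, 0 ≤ ub.2 i := by
          intro i; rw [hrc1 i]; split_ifs
          · omega
          · exact hrcA0 i
        have hcnt1 : ∀ q, ub.1.count q = pvC streams (max r 1) ptr ub.2 n q := by
          intro q
          rw [hub]
          rw [pvUnblockFold_count streams ptr blocked [] rcA q]
          rw [List.count_nil, Nat.zero_add]
          rw [pvCountP_unique _ q.2 (fun s hs => by
            rw [Bool.and_eq_true, beq_iff_eq] at hs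
            rw [← hs.2]) blocked]
          rw [hblk q.2]
          rw [← hub]
          by_cases h0 : 0 ≤ q.2
          · have hq2 : ((q.2.toNat : Nat) : Int) = q.2 := Int.toNat_of_nonneg h0
            by_cases hjn : q.2.toNat < n
            · by_cases hlt : ptr q.2.toNat < pvLen streams q.2.toNat
              · have hnav : ¬ rcA q.2.toNat < max r 1 := fun hrc => hnoavailA _ hjn ⟨hlt, hrc⟩
                have hr0 : ub.2 q.2.toNat = 0 := hrc1live _ hjn hlt
                have hRHS : pvC streams (max r 1) ptr ub.2 n q
                    = if q.1 = pvHeadAt streams q.2.toNat (ptr q.2.toNat) then 1 else 0 := by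
                  unfold pvC pvKey
                  by_cases hkq : q.1 = pvHeadAt streams q.2.toNat (ptr q.2.toNat)
                  · rw [if_pos ⟨h0, hjn, ⟨hlt, by rw [hr0]; omega⟩, Prod.ext hkq hq2.symm⟩, if_pos hkq]
                  · rw [if_neg (fun hcon => hkq (by simpa using congrArg Prod.fst hcon.2.2.2)), if_neg hkq]
                rw [hRHS]
                by_cases hkq : q.1 = pvHeadAt streams q.2.toNat (ptr q.2.toNat)
                · rw [if_pos hkq]
                  split_ifs with h1 h2
                  · rfl
                  · exact absurd ⟨h0, hjn, hlt, hnav⟩ h2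
                  · exfalso
                    apply h1
                    rw [Bool.and_eq_true]
                    exact ⟨decide_eq_true hlt, by rw [beq_iff_eq]; exact Prod.ext hkq.symm rfl⟩
                · rw [if_neg hkq]
                  split_ifs with h1 h2
                  · exfalso
                    rw [Bool.and_eq_true, beq_iff_eq] at h1
                    exact hkq (congrArg Prod.fst h1.2).symm
                  · rfl
                  · rfl
              · have hR : pvC streams (max r 1) ptr ub.2 n q = 0 := by
                  unfold pvC; rw [if_neg (by rintro ⟨-, -, hav, -⟩; exact hlt hav.1)]
                rw [hR]
                split_ifs with h1 h2
                · exact absurd h2.2.2.1 hlt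
                · rfl
                · rfl
            · have hR : pvC streams (max r 1) ptr ub.2 n q = 0 := by
                unfold pvC; rw [if_neg (by rintro ⟨-, h, -⟩; exact hjn h)]
              rw [hR]
              split_ifs with h1 h2
              · exact absurd h2.2.1 hjn
              · rfl
              · rfl
          · have hR : pvC streams (max r 1) ptr ub.2 n q = 0 := by
              unfold pvC; rw [if_neg (by tauto)]
            rw [hR]
            split_ifs with h1 h2
            · exact absurd h2.1 h0
            · rfl
            · rfl
        have hne1 : ub.1 ≠ [] := by
          obtain ⟨s, hs⟩ := List.exists_mem_of_ne_nil blocked hbl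
          obtain ⟨hs0, hsn, hslt, hsrc⟩ := hbfacts s hs
          have hmem1 : pvKey streams ptr s.toNat ∈ ub.1 :=
            pvKey_mem_heap streams (max r 1) n ub.1 ptr ub.2 hcnt1 s.toNat hsn
              ⟨hslt, by rw [hrc1live s.toNat hsn hslt]; omega⟩
          exact List.ne_nil_of_mem hmem1
        have hblk1 : ∀ j : Int, (List.count j ([] : List Int)) =
            if 0 ≤ j ∧ j.toNat < n ∧ ptr j.toNat < pvLen streams j.toNat ∧ ¬ ub.2 j.toNat < max r 1 then 1 else 0 := by
          intro j
          rw [List.count_nil, if_neg]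
          rintro ⟨-, hjn, hjlt, hjrc⟩
          rw [hrc1live j.toNat hjn hjlt] at hjrc
          omega
        have hInv1 : pvInv streams (max r 1) n ub.1 ptr ub.2 (fun _ => 0)
            (fun i => decide (ptr i < pvLen streams i)) [] := by
          refine ⟨hcnt1, hblk1, fun i hi hlt => hrc1live i hi hlt, ?_, hrc1A0,
            fun i => le_refl 0, hptr⟩
          intro i hi
          simp only [decide_eq_true_eq]
          constructor
          · intro h; exact ⟨h, by omega⟩
          · intro h; exact h.1
        -- swap A's state for the unblocked one
        have hbemp : blocked.isEmpty = false := by simpa [List.isEmpty_iff] using hbl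
        have hubemp : ub.1.isEmpty = false := by simpa [List.isEmpty_iff] using hne1
        have hfold : (blocked.foldl
            (fun (p : List (Int × Int) × (Nat → Int)) s =>
              (if ptr s.toNat < pvLen streams s.toNat then
                  (pvHeadAt streams s.toNat (ptr s.toNat), s) :: p.1
                else p.1,
               Function.update p.2 s.toNat 0)) (([] : List (Int × Int)), rcA)) = ub := by
          rw [hub]; rfl
        have hswap : aloop streams r (fa + 1) [] ptr rcA blocked res
            = aloop streams r (fa + 1) ub.1 ptr ub.2 [] res := by
          conv_lhs => simp only [aloop, List.isEmpty_nil, hbemp, Bool.true_and, hfold]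
          conv_rhs => simp only [aloop, hubemp, Bool.false_and]
          simp
        rw [hswap]
        -- one outer B-step: some stream remains, new round starts
        obtain ⟨s0, hs0⟩ := List.exists_mem_of_ne_nil blocked hbl
        obtain ⟨h0s, hsn, hslt, -⟩ := hbfacts s0 hs0
        have hrem1 := pvRem_pos streams n ptr s0.toNat hsn hslt
        obtain ⟨fo', rfl⟩ : ∃ fo', fo = fo' + 1 := ⟨fo - 1, by omega⟩
        have hanyT : ((List.range n).any fun i => decide (ptr i < pvLen streams i)) = true := by
          rw [List.any_eq_true]
          exact ⟨s0.toNat, List.mem_range.2 hsn, by simpa using hslt⟩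
        have hB : bOuter streams r n F (fo' + 1) ptr res
            = pvRun streams r n F fo' F ptr (fun i => decide (ptr i < pvLen streams i)) (fun _ => 0) res := by
          simp only [bOuter, hanyT, if_pos]
          rfl
        rw [hB]
        have hrtot : pvRem streams n ptr ≤ pvTotal streams :=
          pvRem_le_total streams n ptr hn (fun i => (hptr i).1)
        have hstep := pvPopStep streams r n F fa (F - 1) fo' ih ub.1 ptr ub.2 (fun _ => 0)
          (fun i => decide (ptr i < pvLen streams i)) [] res hInv1 hne1
          (by omega) (by omega) (by omega)
        rw [show F - 1 + 1 = F from by omega] at hstep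
        exact hstep

theorem pvSolve_eq (k : Int) (r : Int) (streams : List (List Int))
    (hpre : k ≤ (streams.length : Int)) : solve k r streams = solve_alt k r streams := by
  unfold solve solve_alt
  have hL1 : (1 : Int) ≤ max r 1 := le_max_right r 1
  have hn : k.toNat ≤ streams.length := by omega
  have hrem := pvRem_init streams k.toNat hn
  -- the first outer iteration, as a pvRun (both sides agree when no stream is nonempty)
  have hfirst : bOuter streams r k.toNat (pvTotal streams + 1) (pvTotal streams + 1) (fun _ => 0) []
      = pvRun streams r k.toNat (pvTotal streams + 1) (pvTotal streams) (pvTotal streams + 1)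
          (fun _ => 0) (fun i => decide ((0 : Int) < pvLen streams i)) (fun _ => 0) [] := by
    by_cases hany : ((List.range k.toNat).any fun i => decide ((fun _ => (0:Int)) i < pvLen streams i)) = true
    · simp only [bOuter, hany, if_pos]
      rfl
    · have hanyF : ((List.range k.toNat).any fun i => decide ((fun _ => (0:Int)) i < pvLen streams i)) = false := by
        simpa using hany
      have hinact : ∀ i ∈ List.range k.toNat, (fun i => decide ((0 : Int) < pvLen streams i)) i = false := by
        rw [List.any_eq_false] at hanyF
        intro i hi
        simpa using hanyF i hi
      obtain ⟨ihn, -⟩ := pvScanIdx_spec streams (fun _ => 0) (fun i => decide ((0 : Int) < pvLen streams i)) (List.range k.toNat) none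
      have hscan0 := ihn.2 ⟨rfl, hinact⟩
      unfold pvRun
      rw [pvBInner_done streams r k.toNat (fun _ => 0) _ (fun _ => 0) [] hscan0]
      rw [pvBOuter_done streams r k.toNat (pvTotal streams + 1) (pvTotal streams) (fun _ => 0) [] hanyF]
      simp only [bOuter, hanyF]
      simp
  rw [hfirst]
  apply pvMain streams r k.toNat (pvTotal streams + 1) (le_refl _) hn
  · refine ⟨?_, ?_, fun i _ _ => rfl, ?_, fun i => le_refl 0, fun i => le_refl 0,
      fun i => ⟨le_refl 0, by simp [pvLen]⟩⟩
    · intro q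
      rw [pvInitFold_count streams (fun _ => 0) (List.range k.toNat) [] q]
      rw [List.count_nil, Nat.zero_add]
      rw [pvCountP_unique _ q.2.toNat (fun i hi => by
        rw [Bool.and_eq_true, beq_iff_eq] at hi
        have := congrArg Prod.snd hi.2
        simp at this
        omega) (List.range k.toNat)]
      rw [List.count_range]
      by_cases h0 : 0 ≤ q.2
      · have hq2 : ((q.2.toNat : Nat) : Int) = q.2 := Int.toNat_of_nonneg h0
        by_cases hjn : q.2.toNat < k.toNat
        · by_cases hlt : (0 : Int) < pvLen streams q.2.toNat
          · have hRHS : pvC streams (max r 1) (fun _ => 0) (fun _ => 0) k.toNat q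
                = if q.1 = pvHeadAt streams q.2.toNat 0 then 1 else 0 := by
              unfold pvC pvKey
              by_cases hkq : q.1 = pvHeadAt streams q.2.toNat 0
              · rw [if_pos ⟨h0, hjn, ⟨hlt, lt_of_lt_of_le zero_lt_one hL1⟩, Prod.ext hkq hq2.symm⟩, if_pos hkq]
              · rw [if_neg (fun hcon => hkq (by simpa using congrArg Prod.fst hcon.2.2.2)), if_neg hkq]
            rw [hRHS]
            by_cases hkq : q.1 = pvHeadAt streams q.2.toNat 0
            · rw [if_pos hkq]
              split_ifs with h1
              · rfl
              · exfalso
                apply h1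
                rw [Bool.and_eq_true]
                exact ⟨decide_eq_true hlt, by rw [beq_iff_eq]; exact Prod.ext hkq.symm hq2⟩
            · rw [if_neg hkq]
              split_ifs with h1
              · exfalso
                rw [Bool.and_eq_true, beq_iff_eq] at h1
                exact hkq (congrArg Prod.fst h1.2).symm
              · rfl
          · have hR : pvC streams (max r 1) (fun _ => 0) (fun _ => 0) k.toNat q = 0 := by
              unfold pvC; rw [if_neg (by rintro ⟨-, -, hav, -⟩; exact hlt hav.1)]
            rw [hR]
            split_ifs with h1
            · exfalso
              rw [Bool.and_eq_true] at h1
              exact hlt (of_decide_eq_true h1.1)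
            · rfl
        · have hR : pvC streams (max r 1) (fun _ => 0) (fun _ => 0) k.toNat q = 0 := by
            unfold pvC; rw [if_neg (by rintro ⟨-, h, -⟩; exact hjn h)]
          rw [hR]
          split_ifs with h1
          · rfl
          · rfl
      · have hR : pvC streams (max r 1) (fun _ => 0) (fun _ => 0) k.toNat q = 0 := by
          unfold pvC; rw [if_neg (by tauto)]
        rw [hR]
        split_ifs with h1 h2
        · exfalso
          rw [Bool.and_eq_true, beq_iff_eq] at h1
          have := congrArg Prod.snd h1.2
          simp at this
          omega
        · rfl
        · rfl
    · intro j
      rw [List.count_nil, if_neg]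
      rintro ⟨-, -, -, hcon⟩
      exact hcon (lt_of_lt_of_le zero_lt_one hL1)
    · intro i hi
      simp only [decide_eq_true_eq]
      constructor
      · intro h; exact ⟨h, by omega⟩
      · intro h; exact h.1
  · omega
  · omega
  · omega

-- ===== VERDICT (by name: the statement is the Claim_ definition above) =====
theorem solve_spec : Claim_equal_solve := by
  intro k r streams _ hpre
  exact pvSolve_eq k r streams hpre
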